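-- pv_equiv track=rewrite | github.com/mdrafiqulrabin/SIVAND | helper.py | get_token_deltas
-- ===== SOURCE A (Python) =====
-- def get_token_deltas(program):
--     token, tokens = "", []
--     for c in program:
--         if not c.isalpha():
--             tokens.append(token)
--             tokens.append(c)
--             token = ""
--         else:
--             token = token + c
--     tokens.append(token)
--     tokens = [token for token in tokens if len(token) != 0]
--     deltas = list(zip(range(len(tokens)), tokens))
--     return deltas
-- ===== SOURCE B (Python) =====
-- def get_token_deltas(program):
--     tokens = []
--     i, n = 0, len(program)
--     while i < n:
--         if program[i].isalpha():
--             j = i + 1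
--             while j < n and program[j].isalpha():
--                 j += 1
--             tokens.append(program[i:j])
--             i = j
--         else:
--             tokens.append(program[i])
--             i += 1
--     return list(enumerate(tokens))
-- ===== Notes on version B (the rewrite author's own statement) =====
-- stated objective: alternative
-- what changed: Replaced the accumulate-and-flush fold (build a token char by char, flush on non-alpha, filter out empty tokens at the end) with an index scan over maximal alphabetic runs taken by slicing, which never creates empty tokens and needs no filter pass.
import Mathlib
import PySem

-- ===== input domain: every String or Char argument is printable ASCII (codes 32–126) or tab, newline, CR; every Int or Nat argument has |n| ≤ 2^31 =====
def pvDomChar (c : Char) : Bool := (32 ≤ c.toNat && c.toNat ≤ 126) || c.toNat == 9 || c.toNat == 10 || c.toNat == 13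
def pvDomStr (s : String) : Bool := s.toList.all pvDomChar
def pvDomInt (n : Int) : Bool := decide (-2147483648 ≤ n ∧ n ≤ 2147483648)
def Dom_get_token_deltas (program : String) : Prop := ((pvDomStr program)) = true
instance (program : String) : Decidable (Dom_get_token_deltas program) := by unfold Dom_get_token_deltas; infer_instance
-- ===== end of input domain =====

-- B replaces A's accumulate-and-flush fold (with a final empty-token filter) by a scan over
-- maximal alphabetic runs taken by slicing; same return value, no empty tokens ever built.

-- ===== PORT A =====
-- tokens are modelled as List Char and turned into String at the very end (exact on Dom)
def get_token_deltas (program : String) : List (Int × String) :=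
  let st := program.toList.foldl
    (fun (st : List Char × List (List Char)) c =>
      if ¬ (PySem.Chars.isalpha c = true) then (([] : List Char), st.2 ++ [st.1, [c]])
      else (st.1 ++ [c], st.2))
    ([], [])
  let tokens := st.2 ++ [st.1]
  let tokens := tokens.filter (fun t => t.length != 0)
  List.zip ((List.range tokens.length).map (fun (i : Nat) => (i : Int))) (tokens.map String.mk)

-- ===== PORT B =====
-- the outer while loop of Source B; the inner while scan of an alphabetic run is takeWhile/dropWhile
def altGo (xs : List Char) : List (List Char) :=
  match xs with
  | [] => []
  | c :: rest =>
    if PySem.Chars.isalpha c then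
      (c :: rest.takeWhile PySem.Chars.isalpha) :: altGo (rest.dropWhile PySem.Chars.isalpha)
    else [c] :: altGo rest
termination_by xs.length
decreasing_by
  · simpa using Nat.lt_succ_of_le (List.length_dropWhile_le _ _)
  · simp

def get_token_deltas_alt (program : String) : List (Int × String) :=
  PySem.List.enumerate ((altGo program.toList).map String.mk) 0

-- ===== PRECONDITION & SPEC =====
def Spec_get_token_deltas (program : String) (out : List (Int × String)) : Prop := out = get_token_deltas_alt program
instance (program : String) (out : List (Int × String)) : Decidable (Spec_get_token_deltas program out) := by unfold Spec_get_token_deltas; infer_instance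

-- ===== CLAIM (what is proved, stated in full; the proofs are below) =====
def Claim_equal_get_token_deltas : Prop := ∀ (program : String), Dom_get_token_deltas program → Spec_get_token_deltas program (get_token_deltas program)

-- ===== LEMMAS AND PROOFS =====

-- what A's fold yields for a pending token `token` and remaining input `xs`
def merge (token : List Char) (xs : List Char) : List (List Char) :=
  match xs with
  | [] => if token.isEmpty then [] else [token]
  | c :: rest =>
    if PySem.Chars.isalpha c then merge (token ++ [c]) rest
    else (if token.isEmpty then [] else [token]) ++ [c] :: merge [] rest

lemma foldA_merge : ∀ (xs token : List Char) (tokens : List (List Char)),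
    (((xs.foldl
      (fun (st : List Char × List (List Char)) c =>
        if ¬ (PySem.Chars.isalpha c = true) then (([] : List Char), st.2 ++ [st.1, [c]])
        else (st.1 ++ [c], st.2))
      (token, tokens)).2 ++ [(xs.foldl
      (fun (st : List Char × List (List Char)) c =>
        if ¬ (PySem.Chars.isalpha c = true) then (([] : List Char), st.2 ++ [st.1, [c]])
        else (st.1 ++ [c], st.2))
      (token, tokens)).1]).filter (fun t => t.length != 0))
    = tokens.filter (fun t => t.length != 0) ++ merge token xs := by
  intro xs
  induction xs with
  | nil =>
      intro token tokens
      simp [merge, List.filter_append, List.isEmpty_iff]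
      cases token <;> simp
  | cons c rest ih =>
      intro token tokens
      by_cases h : PySem.Chars.isalpha c = true
      · rw [List.foldl_cons, if_neg (by simp [h]), ih (token ++ [c]) tokens, merge, if_pos h]
      · rw [List.foldl_cons, if_pos h, ih [] (tokens ++ [token, [c]]), merge, if_neg h]
        simp [List.filter_append, List.isEmpty_iff]
        cases token <;> simp

lemma merge_eq_altGo : ∀ (xs : List Char),
    merge [] xs = altGo xs ∧
    (∀ token : List Char, token ≠ [] →
      merge token xs = (token ++ xs.takeWhile PySem.Chars.isalpha) :: altGo (xs.dropWhile PySem.Chars.isalpha)) := by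
  intro xs
  induction xs with
  | nil =>
      refine ⟨by simp [merge, altGo], ?_⟩
      intro token h
      simp [merge, altGo, List.isEmpty_iff, h]
  | cons c rest ih =>
      by_cases hc : PySem.Chars.isalpha c = true
      · constructor
        · rw [merge, if_pos hc, List.nil_append, ih.2 [c] (by simp), altGo, if_pos hc]
          simp
        · intro token h
          rw [merge, if_pos hc, ih.2 (token ++ [c]) (by simp)]
          simp [List.takeWhile_cons_of_pos hc, List.dropWhile_cons_of_pos hc]
      · constructor
        · rw [merge, if_neg hc, altGo, if_neg hc]
          simp [ih.1]
        · intro token h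
          rw [merge, if_neg hc, List.takeWhile_cons_of_neg hc, List.dropWhile_cons_of_neg hc,
              altGo, if_neg hc]
          simp [List.isEmpty_iff, h, ih.1]

lemma zip_range_eq_enumerate : ∀ {α : Type} (xs : List α) (s : Int),
    List.zip ((List.range xs.length).map (fun (i : Nat) => s + (i : Int))) xs = PySem.List.enumerate xs s := by
  intro α xs
  induction xs with
  | nil => intro s; simp [PySem.List.enumerate]
  | cons x rest ih =>
      intro s
      rw [List.length_cons, List.range_succ_eq_map, List.map_cons, List.zip_cons_cons,
          PySem.List.enumerate_cons, List.map_map]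
      congr 1
      · norm_num
      rw [← ih (s + 1)]
      congr 1
      apply List.map_congr_left
      intro i _
      simp [Function.comp]
      ring

-- ===== VERDICT (by name: the statement is the Claim_ definition above) =====
theorem get_token_deltas_spec : Claim_equal_get_token_deltas := by
  intro program _
  unfold Spec_get_token_deltas get_token_deltas get_token_deltas_alt
  have h := foldA_merge program.toList [] []
  simp only at h ⊢
  rw [h, (merge_eq_altGo program.toList).1, List.filter_nil, List.nil_append]
  have hz := zip_range_eq_enumerate ((altGo program.toList).map String.mk) 0
  simp only [zero_add] at hz
  rw [← hz]
  simp
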